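-- pv_equiv track=rewrite | github.com/Esmaeili01/Conv2Crypt | conv2crypt.py | conv_decrypt
-- ===== SOURCE A (Python) =====
-- alphabet = 'ABCDEFGHIJKLMNOPQRSTUVWXYZ'
--
-- def conv_decrypt(cipher : str , kernel : list) -> str :
--
--     cipher = cipher.upper()
--     n = len(cipher)
--     m = len(kernel)
--     text = ""
--     for i in range(n - m + 1) :
--         sum = 0
--         for j in range(m) :
--             sum += alphabet.find(cipher[i+j]) * kernel[j]
--         sum = sum % 26
--
--         text += alphabet[sum]
--
--
--     return text
-- ===== SOURCE B (Python) =====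
-- alphabet = 'ABCDEFGHIJKLMNOPQRSTUVWXYZ'
--
-- def conv_decrypt(cipher: str, kernel: list) -> str:
--     # Scatter each kernel tap across all output positions (tap-by-tap accumulation)
--     idx = [alphabet.find(c) for c in cipher.upper()]
--     out_len = len(idx) - len(kernel) + 1
--     if out_len <= 0:
--         return ""
--     acc = [0] * out_len
--     for j, k in enumerate(kernel):
--         acc = [a + k * v for a, v in zip(acc, idx[j:j + out_len])]
--     return ''.join(alphabet[s % 26] for s in acc)
-- ===== Notes on version B (the rewrite author's own statement) =====
-- stated objective: alternative
-- what changed: B precomputes the index array once and accumulates the convolution tap-by-tap (outer loop over kernel taps, elementwise update of an accumulator array over all output positions), instead of A's per-window gather with repeated alphabet.find calls; mod 26 and the letter lookup happen once per output at the end.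
import Mathlib
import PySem

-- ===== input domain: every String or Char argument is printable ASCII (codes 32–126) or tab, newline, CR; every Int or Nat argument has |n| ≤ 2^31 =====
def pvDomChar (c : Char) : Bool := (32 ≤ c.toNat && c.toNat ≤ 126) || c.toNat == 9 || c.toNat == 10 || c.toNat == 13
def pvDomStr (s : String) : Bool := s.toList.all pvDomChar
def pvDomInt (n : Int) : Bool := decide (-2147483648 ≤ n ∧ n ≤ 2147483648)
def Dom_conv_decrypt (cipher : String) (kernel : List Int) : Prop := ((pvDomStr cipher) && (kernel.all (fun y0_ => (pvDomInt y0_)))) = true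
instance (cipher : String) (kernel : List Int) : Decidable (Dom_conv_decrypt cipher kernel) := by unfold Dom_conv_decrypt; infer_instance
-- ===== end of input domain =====

-- B accumulates the sliding dot-product tap-by-tap into an accumulator array (a different decomposition of the same O(n*m) work); no speed claim.

def pvAlpha : List Char := "ABCDEFGHIJKLMNOPQRSTUVWXYZ".toList

-- ===== PORT A =====
def conv_decrypt (cipher : String) (kernel : List Int) : String :=
  let cs : List Char := PySem.Chars.upper cipher.toList
  let n : Int := cs.length
  let m : Int := kernel.length
  let text : List Char :=
    (PySem.List.pyRange 0 (n - m + 1) 1).foldl (fun text i =>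
      let sum : Int :=
        (PySem.List.pyRange 0 m 1).foldl (fun sum j =>
          sum + PySem.Chars.find pvAlpha [PySem.List.pyGetD cs (i + j) ' '] * PySem.List.pyGetD kernel j 0) 0
      let sum : Int := PySem.Int.mod sum 26
      text ++ [PySem.List.pyGetD pvAlpha sum ' ']) []
  String.mk text

-- ===== PORT B =====
def conv_decrypt_alt (cipher : String) (kernel : List Int) : String :=
  let idx : List Int := (PySem.Chars.upper cipher.toList).map (fun c => PySem.Chars.find pvAlpha [c])
  let outLen : Int := (idx.length : Int) - kernel.length + 1
  if outLen ≤ 0 then "" else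
    let acc0 : List Int := List.replicate outLen.toNat 0
    let acc : List Int :=
      (PySem.List.enumerate kernel 0).foldl (fun acc jk =>
        List.zipWith (fun a v => a + jk.2 * v) acc
          (PySem.List.slice idx (some jk.1) (some (jk.1 + outLen)))) acc0
    String.mk (acc.map (fun s => PySem.List.pyGetD pvAlpha (PySem.Int.mod s 26) ' '))

-- ===== PRECONDITION & SPEC =====
def Spec_conv_decrypt (cipher : String) (kernel : List Int) (out : String) : Prop := out = conv_decrypt_alt cipher kernel
instance (cipher : String) (kernel : List Int) (out : String) : Decidable (Spec_conv_decrypt cipher kernel out) := by unfold Spec_conv_decrypt; infer_instance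

-- ===== CLAIM (what is proved, stated in full; the proofs are below) =====
def Claim_equal_conv_decrypt : Prop := ∀ (cipher : String) (kernel : List Int), Dom_conv_decrypt cipher kernel → Spec_conv_decrypt cipher kernel (conv_decrypt cipher kernel)

-- ===== LEMMAS AND PROOFS =====

-- the common value: Σ_j kernel[j] * idx[p+j], as a zipWith-sum
def pvDot (idx ker : List Int) (p : Nat) : Int :=
  (List.zipWith (· * ·) ker (idx.drop p)).sum

theorem pvDot_cons (idx : List Int) (k : Int) (ker : List Int) (p : Nat)
    (hp : p < idx.length) :
    pvDot idx (k :: ker) p = k * idx.getD p 0 + pvDot idx ker (p + 1) := by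
  unfold pvDot
  rw [List.drop_eq_getElem_cons hp, List.zipWith_cons_cons, List.sum_cons,
    List.getD_eq_getElem idx 0 hp]

theorem sumDot (cs : List Char) (ker : List Int) (p : Nat)
    (h : p + ker.length ≤ cs.length) :
    ((List.range ker.length).map
      (fun k => PySem.Chars.find pvAlpha [cs.getD (p + k) ' '] * ker.getD k 0)).sum
    = pvDot (cs.map (fun c => PySem.Chars.find pvAlpha [c]) ) ker p := by
  induction ker generalizing p with
  | nil => simp [pvDot]
  | cons k ker ih =>
    have hp : p < cs.length := by simp at h; omega
    have hp' : p < (cs.map (fun c => PySem.Chars.find pvAlpha [c])).length := by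
      simpa using hp
    rw [List.length_cons, List.range_succ_eq_map, List.map_cons, List.map_map,
      List.sum_cons, pvDot_cons _ _ _ _ hp']
    have h1 : PySem.Chars.find pvAlpha [cs.getD (p + 0) ' '] * (k :: ker).getD 0 0
        = k * (cs.map (fun c => PySem.Chars.find pvAlpha [c])).getD p 0 := by
      rw [List.getD_eq_getElem _ 0 hp', List.getElem_map, Nat.add_zero,
        List.getD_eq_getElem cs ' ' hp]
      simp [mul_comm]
    rw [h1]
    congr 1
    rw [← ih (p + 1) (by simp at h; omega)]
    congr 1
    apply List.map_congr_left
    intro j _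
    simp only [Function.comp_apply]
    have hpj : p + (j + 1) = p + 1 + j := by omega
    simp [Nat.succ_eq_add_one, hpj]

-- A's inner window loop computes pvDot
theorem innerA (cs : List Char) (ker : List Int) (p : Nat)
    (h : p + ker.length ≤ cs.length) :
    (PySem.List.pyRange 0 (ker.length : Int) 1).foldl
      (fun sum j => sum + PySem.Chars.find pvAlpha [PySem.List.pyGetD cs ((p : Int) + j) ' ']
          * PySem.List.pyGetD ker j 0) 0
    = pvDot (cs.map (fun c => PySem.Chars.find pvAlpha [c])) ker p := by
  rw [PySem.List.foldl_add, PySem.List.pyRange_one, List.map_map]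
  rw [← sumDot cs ker p h]
  simp only [zero_add, sub_zero, Int.toNat_natCast]
  congr 1
  apply List.map_congr_left
  intro j _
  simp only [Function.comp]
  have : ((p : Int) + (j : Int)) = ((p + j : Nat) : Int) := by push_cast; ring
  rw [this, PySem.List.pyGetD_natCast, PySem.List.pyGetD_natCast]

-- B's tap loop invariant
theorem loopB (idx : List Int) (L : Nat) (rest : List Int) (t : Nat) (f : Nat → Int)
    (h : t + rest.length + L ≤ idx.length + 1) :
    (PySem.List.enumerate rest (t : Int)).foldl
      (fun acc jk =>
        List.zipWith (fun a v => a + jk.2 * v) acc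
          (PySem.List.slice idx (some jk.1) (some (jk.1 + (L : Int)))))
      ((List.range L).map f)
    = (List.range L).map (fun i => f i + pvDot idx rest (t + i)) := by
  induction rest generalizing t f with
  | nil => simp [PySem.List.enumerate, pvDot]
  | cons k rest ih =>
    rw [PySem.List.enumerate_cons, List.foldl_cons]
    have hL : t + L ≤ idx.length := by simp at h; omega
    have hslice : PySem.List.slice idx (some (t : Int)) (some ((t : Int) + (L : Int)))
        = (idx.drop t).take L := by
      rw [PySem.List.slice_toNat idx (by positivity) (by positivity)]
      congr 1
      omega
    have hstep : List.zipWith (fun a v => a + k * v) ((List.range L).map f)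
        (PySem.List.slice idx (some (t : Int)) (some ((t : Int) + (L : Int))))
        = (List.range L).map (fun i => f i + k * idx.getD (t + i) 0) := by
      rw [hslice]
      apply List.ext_getElem
      · simp; omega
      · intro i h1 h2
        have hi : i < L := by simp at h2; omega
        have hti : t + i < idx.length := by omega
        simp only [List.getElem_zipWith, List.getElem_map, List.getElem_range,
          List.getElem_take, List.getElem_drop]
        rw [List.getD_eq_getElem idx 0 hti]
    rw [hstep]
    have ht1 : ((t : Int) + 1) = ((t + 1 : Nat) : Int) := by push_cast; ring
    rw [ht1, ih (t + 1) _ (by simp at h ⊢; omega)]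
    apply List.map_congr_left
    intro i hi
    have hti : t + i < idx.length := by simp at h hi; omega
    rw [pvDot_cons _ _ _ _ hti]
    have : t + 1 + i = (t + i) + 1 := by omega
    rw [this]
    ring

theorem loopB0 (idx : List Int) (L : Nat) (rest : List Int) (f : Nat → Int)
    (h : rest.length + L ≤ idx.length + 1) :
    (PySem.List.enumerate rest 0).foldl
      (fun acc jk =>
        List.zipWith (fun a v => a + jk.2 * v) acc
          (PySem.List.slice idx (some jk.1) (some (jk.1 + (L : Int)))))
      ((List.range L).map f)
    = (List.range L).map (fun i => f i + pvDot idx rest i) := by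
  have := loopB idx L rest 0 f (by omega)
  simpa using this

theorem conv_decrypt_spec : Claim_equal_conv_decrypt := by
  unfold Claim_equal_conv_decrypt
  intro cipher kernel _
  unfold Spec_conv_decrypt conv_decrypt conv_decrypt_alt
  simp only []
  set cs : List Char := PySem.Chars.upper cipher.toList with hcs
  set idx : List Int := cs.map (fun c => PySem.Chars.find pvAlpha [c]) with hidx
  have hlen : idx.length = cs.length := by simp [hidx]
  by_cases hle : ((cs.length : Int) - kernel.length + 1) ≤ 0
  · rw [if_pos (by rw [hlen]; exact hle)]
    rw [show PySem.List.pyRange 0 ((cs.length : Int) - kernel.length + 1) = []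
      from PySem.List.pyRange_one_eq_nil (by omega)]
    rfl
  · rw [if_neg (by rw [hlen]; exact hle)]
    set L : Nat := ((cs.length : Int) - kernel.length + 1).toNat with hL
    have houtLen : ((idx.length : Int) - kernel.length + 1) = (L : Int) := by
      rw [hlen]; omega
    rw [houtLen]
    have hrep : List.replicate ((L : Int)).toNat (0 : Int)
        = (List.range L).map (fun _ => (0 : Int)) := by simp
    rw [hrep, loopB0 idx L kernel _ (by omega)]
    rw [PySem.List.foldl_append_singleton_eq_map, List.nil_append]
    have hout : PySem.List.pyRange 0 ((cs.length : Int) - kernel.length + 1)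
        = (List.range L).map (fun k => ((k : Nat) : Int)) := by
      rw [PySem.List.pyRange_one]
      simp
      rw [← hL]
    rw [hout, List.map_map, List.map_map]
    congr 1
    apply List.map_congr_left
    intro p hp
    have hpL : p < L := by simpa using hp
    simp only [Function.comp_apply]
    rw [innerA cs kernel p (by omega)]
    simp [hidx]
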